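-- pv_equiv track=rewrite | github.com/Adlona28/yahoo-basketball-fantasy-tool | dataCleaner/weeklyStats.py | get_team_wins_summary
-- ===== SOURCE A (Python) =====
-- def compare_team_positions(rankings, team1, team2):
--
--     team1_count = sum(rankings[stat].index(team1) < rankings[stat].index(team2) for stat in rankings)
--     team2_count = sum(rankings[stat].index(team2) < rankings[stat].index(team1) for stat in rankings)
--
--     if team1_count > team2_count:
--         return team1
--     elif team2_count > team1_count:
--         return team2
--     else:
--         return "Tie"
--
-- def getAllWins(rankings, team_names):
--     winningSets = {team: set() for team in team_names}
--
--     for team in team_names: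
--         for other_team in team_names:
--             if team == other_team:
--                 continue
--
--             better_team = compare_team_positions(rankings, team, other_team)
--             if better_team == team:
--                 winningSets[team].add(other_team)
--
--     return winningSets
--
-- def get_team_wins_summary(rankings, team_names):
--     winning_sets = getAllWins(rankings, team_names)
--
--     # Initialize a dictionary to store the total wins for each team
--     total_wins = {team: 0 for team in team_names}
--
--     for team, wins_against in winning_sets.items():
--         total_wins[team] = len(wins_against)
--
--     team_wins_summary = [(team, total_wins[team]) for team in team_names]
--     team_wins_summary.sort(key=lambda x: x[1], reverse=True)
--
--     return team_wins_summary
-- ===== SOURCE B (Python) =====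
-- def get_team_wins_summary(rankings, team_names):
--     # Inverted loops: scan each ranking once, accumulating a net head-to-head score
--     # per ordered pair from its first-occurrence order, instead of querying .index
--     # for every team pair in every stat list.
--     net = {}
--     for order in rankings.values():
--         seen = []
--         for t in order:
--             if t not in seen:
--                 for s in seen:
--                     net[(s, t)] = net.get((s, t), 0) + 1
--                     net[(t, s)] = net.get((t, s), 0) - 1
--                 seen.append(t)
--     summary = [(t, len({u for u in team_names if u != t and net.get((t, u), 0) > 0}))
--                for t in team_names]
--     summary.sort(key=lambda x: x[1], reverse=True)
--     return summary
-- ===== Notes on version B (the rewrite author's own statement) =====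
-- stated objective: alternative
-- what changed: B inverts the loop structure: instead of A's per-pair comparisons that rescan every ranking list with .index and collect winner sets, B scans each ranking once over its first-occurrence pairs, accumulating a signed net score per ordered pair in one dict, and then counts for each team the distinct opponents with positive net before the same stable sort.
-- intended difference: On rosters containing a team literally named "Tie" that is exactly tied with some opponent, A credits that team a win for each tied opponent (its sentinel string collides with the team name, e.g. A returns [('Tie', 1), ('A', 0)] on ({}, ['Tie', 'A'])), while B returns [('Tie', 0), ('A', 0)] there, counting a tie as no win, which is the intended majority rule. — e.g. on get_team_wins_summary([], ["Tie", "A"]): A returns [("Tie", 1), ("A", 0)], B returns [("Tie", 0), ("A", 0)]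
import Mathlib
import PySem

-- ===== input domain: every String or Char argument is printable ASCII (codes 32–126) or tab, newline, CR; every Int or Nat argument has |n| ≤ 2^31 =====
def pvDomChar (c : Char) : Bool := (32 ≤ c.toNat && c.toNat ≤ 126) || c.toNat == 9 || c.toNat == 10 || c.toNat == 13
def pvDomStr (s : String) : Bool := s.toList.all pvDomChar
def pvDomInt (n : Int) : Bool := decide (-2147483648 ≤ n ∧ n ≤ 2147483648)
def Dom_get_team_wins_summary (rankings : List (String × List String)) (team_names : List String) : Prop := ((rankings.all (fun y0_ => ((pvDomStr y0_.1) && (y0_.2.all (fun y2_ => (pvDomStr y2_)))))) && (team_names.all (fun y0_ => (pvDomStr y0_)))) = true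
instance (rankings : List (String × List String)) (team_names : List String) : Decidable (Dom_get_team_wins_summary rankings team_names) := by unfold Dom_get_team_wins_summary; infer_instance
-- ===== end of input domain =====

-- B inverts the loops: it scans each ranking once, accumulating a net head-to-head score per
-- ordered pair from first-occurrence order, instead of querying .index per team pair per stat.


-- ===== PORT A =====
-- rankings[stat].index(team): ValueError (none) when absent — excluded by Pre_, so .getD 0 is exact there
def pvIdx (l : List String) (t : String) : Nat := (PySem.List.index? l t).getD 0

def pvCompare (items : List (String × List String)) (t1 t2 : String) : String :=
  let c1 : Int := (items.map (fun p => if pvIdx p.2 t1 < pvIdx p.2 t2 then (1 : Int) else 0)).sum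
  let c2 : Int := (items.map (fun p => if pvIdx p.2 t2 < pvIdx p.2 t1 then (1 : Int) else 0)).sum
  if c1 > c2 then t1 else if c2 > c1 then t2 else "Tie"

def pvGetAllWins (items : List (String × List String)) (team_names : List String) :
    PySem.Dict String (PySem.Set String) :=
  let ws0 := team_names.foldl (fun d t => d.insert t PySem.Set.empty) PySem.Dict.empty
  team_names.foldl (fun d t =>
    team_names.foldl (fun d' u =>
      if t == u then d'
      else if pvCompare items t u == t then d'.modify t PySem.Set.empty (fun s => PySem.Set.add s u)
      else d') d) ws0

def get_team_wins_summary (rankings : List (String × List String)) (team_names : List String) : List (String × Int) :=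
  let items := (PySem.Dict.ofList rankings).items
  let winning_sets := pvGetAllWins items team_names
  let total0 : PySem.Dict String Int := team_names.foldl (fun d t => d.insert t 0) PySem.Dict.empty
  let total_wins := winning_sets.items.foldl (fun d p => d.insert p.1 (PySem.Set.len p.2)) total0
  let team_wins_summary := team_names.map (fun t => (t, total_wins.getD t 0))
  PySem.List.sorted team_wins_summary (fun x => x.2) true

-- ===== PORT B =====
-- for each already-seen s: net[(s,t)] = net.get((s,t),0)+1; net[(t,s)] = net.get((t,s),0)-1
def pvAddPairs (n : PySem.Dict (String × String) Int) (seen : List String) (t : String) :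
    PySem.Dict (String × String) Int :=
  seen.foldl (fun n s =>
    let n1 := n.insert (s, t) (n.getD (s, t) 0 + 1)
    n1.insert (t, s) (n1.getD (t, s) 0 - 1)) n

-- one ranking scan: 'seen' is the first-occurrence list built so far
def pvNetStep (n : PySem.Dict (String × String) Int) (order : List String) :
    PySem.Dict (String × String) Int :=
  (order.foldl (fun acc t =>
      if acc.2.contains t then acc
      else (pvAddPairs acc.1 acc.2 t, acc.2 ++ [t]))
    (n, ([] : List String))).1

def get_team_wins_summary_alt (rankings : List (String × List String)) (team_names : List String) : List (String × Int) :=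
  let net := ((PySem.Dict.ofList rankings).items).foldl (fun n p => pvNetStep n p.2) PySem.Dict.empty
  let summary := team_names.map (fun t =>
    (t, PySem.Set.len (PySem.Set.ofList
          (team_names.filter (fun u => u != t && decide (net.getD (t, u) 0 > 0))))))
  PySem.List.sorted summary (fun x => x.2) true

-- ===== PRECONDITION & SPEC =====
-- Pre_ is exactly A's return domain: when the roster has two distinct names, every compared pair is
-- looked up in every stat list, so A raises ValueError unless every team appears in every stat list.
def Pre_get_team_wins_summary (rankings : List (String × List String)) (team_names : List String) : Prop :=
  (∃ a ∈ team_names, ∃ b ∈ team_names, a ≠ b) →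
    ∀ t ∈ team_names, ∀ p ∈ (PySem.Dict.ofList rankings).items, t ∈ p.2
instance (rankings : List (String × List String)) (team_names : List String) : Decidable (Pre_get_team_wins_summary rankings team_names) := by unfold Pre_get_team_wins_summary; infer_instance

def pvWitness_get_team_wins_summary : (List (String × List String)) × List String :=
  ([("s", ["A", "B"])], ["A", "B"])

-- On rosters containing a team literally named "Tie" that is exactly tied with some opponent,
-- A credits that team a win for each tied opponent (its "Tie" sentinel collides with the name),
-- while B counts a tie as no win, which is the intended majority rule.
def D_get_team_wins_summary (rankings : List (String × List String)) (team_names : List String) : Prop :=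
  "Tie" ∈ team_names ∧ ∃ u ∈ team_names, u ≠ "Tie" ∧
    ((PySem.Dict.ofList rankings).items.countP (fun p => p.2.idxOf "Tie" < p.2.idxOf u)
      = (PySem.Dict.ofList rankings).items.countP (fun p => p.2.idxOf u < p.2.idxOf "Tie"))
instance (rankings : List (String × List String)) (team_names : List String) : Decidable (D_get_team_wins_summary rankings team_names) := by unfold D_get_team_wins_summary; infer_instance

def Spec_get_team_wins_summary (rankings : List (String × List String)) (team_names : List String) (out : List (String × Int)) : Prop := ¬ D_get_team_wins_summary rankings team_names → out = get_team_wins_summary_alt rankings team_names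
instance (rankings : List (String × List String)) (team_names : List String) (out : List (String × Int)) : Decidable (Spec_get_team_wins_summary rankings team_names out) := by unfold Spec_get_team_wins_summary; infer_instance

def pvDiffWitness_get_team_wins_summary : (List (String × List String)) × List String :=
  ([], ["Tie", "A"])
def pvDiffWitnessOut_get_team_wins_summary : (List (String × Int)) × (List (String × Int)) :=
  ([("Tie", 1), ("A", 0)], [("Tie", 0), ("A", 0)])

-- ===== CLAIM (what is proved, stated in full; the proofs are below) =====
def Claim_unchanged_get_team_wins_summary : Prop := ∀ (rankings : List (String × List String)) (team_names : List String), Dom_get_team_wins_summary rankings team_names → Pre_get_team_wins_summary rankings team_names → Spec_get_team_wins_summary rankings team_names (get_team_wins_summary rankings team_names)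
def Claim_changed_get_team_wins_summary : Prop := Dom_get_team_wins_summary (pvDiffWitness_get_team_wins_summary.1) (pvDiffWitness_get_team_wins_summary.2) ∧ Pre_get_team_wins_summary (pvDiffWitness_get_team_wins_summary.1) (pvDiffWitness_get_team_wins_summary.2) ∧ D_get_team_wins_summary (pvDiffWitness_get_team_wins_summary.1) (pvDiffWitness_get_team_wins_summary.2) ∧ get_team_wins_summary (pvDiffWitness_get_team_wins_summary.1) (pvDiffWitness_get_team_wins_summary.2) = pvDiffWitnessOut_get_team_wins_summary.1 ∧ get_team_wins_summary_alt (pvDiffWitness_get_team_wins_summary.1) (pvDiffWitness_get_team_wins_summary.2) = pvDiffWitnessOut_get_team_wins_summary.2 ∧ pvDiffWitnessOut_get_team_wins_summary.1 ≠ pvDiffWitnessOut_get_team_wins_summary.2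

def Claim_exact_get_team_wins_summary : Prop := ∀ (rankings : List (String × List String)) (team_names : List String), Dom_get_team_wins_summary rankings team_names → Pre_get_team_wins_summary rankings team_names → D_get_team_wins_summary rankings team_names → get_team_wins_summary rankings team_names ≠ get_team_wins_summary_alt rankings team_names

-- ===== LEMMAS AND PROOFS =====
-- (everything below is proof machinery only)

-- the effective condition of A's inner loop: u is a distinct opponent whose compare-token is t
def pvCondA (items : List (String × List String)) (t u : String) : Bool :=
  !(t == u) && (pvCompare items t u == t)


-- ---- B-side: characterizing the net dictionary ----

-- the 'seen' list a ranking scan builds: keep-first dedup appended to S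
def pvSeen (S : List String) (order : List String) : List String :=
  order.foldl (fun s x => if s.contains x then s else s ++ [x]) S

-- the contribution of one ranking (with first-occurrence list L) to net[(t,u)]
def pvSign (L : List String) (t u : String) : Int :=
  if t ∈ L ∧ u ∈ L then (if L.idxOf t < L.idxOf u then 1 else -1) else 0

lemma pvSeen_nil (S : List String) : pvSeen S [] = S := rfl

lemma pvSeen_cons (S : List String) (x : String) (rest : List String) :
    pvSeen S (x :: rest) = pvSeen (if S.contains x then S else S ++ [x]) rest := by
  rfl

lemma pvSeen_prefix (order S : List String) : ∃ ext, S ++ ext = pvSeen S order := by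
  induction order generalizing S with
  | nil => exact ⟨[], by simp [pvSeen_nil]⟩
  | cons x rest ih =>
    rw [pvSeen_cons]
    by_cases hx : S.contains x = true
    · rw [if_pos hx]; exact ih S
    · rw [if_neg hx]
      obtain ⟨ext, hext⟩ := ih (S ++ [x])
      exact ⟨x :: ext, by simpa using hext⟩

lemma pvSeen_mem (order S : List String) (a : String) :
    a ∈ pvSeen S order ↔ a ∈ S ∨ a ∈ order := by
  induction order generalizing S with
  | nil => simp [pvSeen_nil]
  | cons x rest ih =>
    rw [pvSeen_cons]
    by_cases hx : S.contains x = true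
    · rw [if_pos hx, ih]
      have hxS : x ∈ S := by simpa using hx
      constructor
      · rintro (h | h)
        · exact Or.inl h
        · exact Or.inr (by simp [h])
      · rintro (h | h)
        · exact Or.inl h
        · rcases List.mem_cons.mp h with rfl | h
          · exact Or.inl hxS
          · exact Or.inr h
    · rw [if_neg hx, ih]
      simp only [List.mem_append, List.mem_cons]
      tauto

lemma pvSeen_idxOf_mem (order S : List String) (a : String) (ha : a ∈ S) :
    (pvSeen S order).idxOf a = S.idxOf a := by
  obtain ⟨ext, hext⟩ := pvSeen_prefix order S
  rw [← hext, List.idxOf_append_of_mem ha]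

lemma pvSeen_idxOf_notMem (order S : List String) (a : String) (ha : a ∉ S) :
    S.length ≤ (pvSeen S order).idxOf a := by
  obtain ⟨ext, hext⟩ := pvSeen_prefix order S
  rw [← hext, List.idxOf_append_of_notMem ha]
  omega

-- appending one fresh element to the seen list shifts the pair-sign exactly as pvAddPairs does
lemma pvSign_snoc (S : List String) (x t u : String) (hx : x ∉ S) (htu : t ≠ u) :
    pvSign (S ++ [x]) t u
      = pvSign S t u + (if t ∈ S ∧ u = x then 1 else 0) - (if u ∈ S ∧ t = x then 1 else 0) := by
  have hmem : ∀ a : String, a ∈ S ++ [x] ↔ a ∈ S ∨ a = x := by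
    intro a; simp [List.mem_append]
  by_cases hux : u = x
  · have huS : u ∉ S := hux ▸ hx
    have e2 : (if u ∈ S ∧ t = x then (1 : Int) else 0) = 0 := if_neg (by tauto)
    have e0 : pvSign S t u = 0 := if_neg (by tauto)
    by_cases htS : t ∈ S
    · have e1 : (if t ∈ S ∧ u = x then (1 : Int) else 0) = 1 := if_pos ⟨htS, hux⟩
      have h1 : (S ++ [x]).idxOf t = S.idxOf t := List.idxOf_append_of_mem htS
      have h2 : (S ++ [x]).idxOf u = S.length + [x].idxOf u := by
        rw [List.idxOf_append_of_notMem huS]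
      have h3 : S.idxOf t < S.length := List.idxOf_lt_length_of_mem htS
      have e3 : pvSign (S ++ [x]) t u = 1 := by
        rw [pvSign, if_pos ⟨(hmem t).mpr (Or.inl htS), (hmem u).mpr (Or.inr hux)⟩,
            if_pos (by omega)]
      rw [e0, e1, e2, e3]
      ring
    · have e1 : (if t ∈ S ∧ u = x then (1 : Int) else 0) = 0 := if_neg (by tauto)
      have e3 : pvSign (S ++ [x]) t u = 0 :=
        if_neg (fun h => htS (((hmem t).mp h.1).resolve_right (fun he => htu (he.trans hux.symm))))
      rw [e0, e1, e2, e3]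
      ring
  · by_cases htx : t = x
    · have htS : t ∉ S := htx ▸ hx
      have e1 : (if t ∈ S ∧ u = x then (1 : Int) else 0) = 0 := if_neg (by tauto)
      have e0 : pvSign S t u = 0 := if_neg (by tauto)
      by_cases huS : u ∈ S
      · have e2 : (if u ∈ S ∧ t = x then (1 : Int) else 0) = 1 := if_pos ⟨huS, htx⟩
        have h1 : (S ++ [x]).idxOf u = S.idxOf u := List.idxOf_append_of_mem huS
        have h2 : (S ++ [x]).idxOf t = S.length + [x].idxOf t := by
          rw [List.idxOf_append_of_notMem htS]
        have h3 : S.idxOf u < S.length := List.idxOf_lt_length_of_mem huS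
        have e3 : pvSign (S ++ [x]) t u = -1 := by
          rw [pvSign, if_pos ⟨(hmem t).mpr (Or.inr htx), (hmem u).mpr (Or.inl huS)⟩,
              if_neg (by omega)]
        rw [e0, e1, e2, e3]
        ring
      · have e2 : (if u ∈ S ∧ t = x then (1 : Int) else 0) = 0 := if_neg (by tauto)
        have e3 : pvSign (S ++ [x]) t u = 0 :=
          if_neg (fun h => huS (((hmem u).mp h.2).resolve_right hux))
        rw [e0, e1, e2, e3]
        ring
    · have e1 : (if t ∈ S ∧ u = x then (1 : Int) else 0) = 0 := if_neg (by tauto)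
      have e2 : (if u ∈ S ∧ t = x then (1 : Int) else 0) = 0 := if_neg (by tauto)
      rw [e1, e2]
      by_cases hb : t ∈ S ∧ u ∈ S
      · rw [pvSign, pvSign, if_pos ⟨(hmem t).mpr (Or.inl hb.1), (hmem u).mpr (Or.inl hb.2)⟩,
            if_pos hb, List.idxOf_append_of_mem hb.1, List.idxOf_append_of_mem hb.2]
        ring
      · rw [pvSign, pvSign,
            if_neg (fun h => hb ⟨((hmem t).mp h.1).resolve_right htx,
              ((hmem u).mp h.2).resolve_right hux⟩), if_neg hb]
        ring


-- one pvAddPairs pass updates exactly the pairs (s,t)/(t,s) for s in seen, once each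
lemma pvAddPairs_getD (seen : List String) (n : PySem.Dict (String × String) Int)
    (x t u : String) (hx : x ∉ seen) (hnd : seen.Nodup) (htu : t ≠ u) :
    (pvAddPairs n seen x).getD (t, u) 0
      = n.getD (t, u) 0 + (if t ∈ seen ∧ u = x then 1 else 0)
          - (if u ∈ seen ∧ t = x then 1 else 0) := by
  induction seen generalizing n with
  | nil => simp [pvAddPairs]
  | cons s rest ih =>
    have hsx : s ≠ x := fun h => hx (by simp [h])
    have hsrest : s ∉ rest := (List.nodup_cons.mp hnd).1
    have hxrest : x ∉ rest := fun h => hx (by simp [h])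
    have hstep : pvAddPairs n (s :: rest) x
        = pvAddPairs ((n.insert (s, x) (n.getD (s, x) 0 + 1)).insert (x, s)
            ((n.insert (s, x) (n.getD (s, x) 0 + 1)).getD (x, s) 0 - 1)) rest x := rfl
    rw [hstep, ih _ hxrest (List.nodup_cons.mp hnd).2]
    have hval : (n.insert (s, x) (n.getD (s, x) 0 + 1)).getD (x, s) 0 = n.getD (x, s) 0 := by
      rw [PySem.Dict.getD_insert, if_neg (by simp [hsx.symm])]
    rw [hval]
    have hgd : ((n.insert (s, x) (n.getD (s, x) 0 + 1)).insert (x, s) (n.getD (x, s) 0 - 1)).getD (t, u) 0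
        = if t = x ∧ u = s then n.getD (x, s) 0 - 1
          else if t = s ∧ u = x then n.getD (s, x) 0 + 1
          else n.getD (t, u) 0 := by
      rw [PySem.Dict.getD_insert, PySem.Dict.getD_insert]
      by_cases h1 : t = x ∧ u = s
      · rw [if_pos (by simp [h1.1, h1.2]), if_pos h1]
      · rw [if_neg (by simp only [Prod.mk.injEq]; exact fun h => h1 ⟨h.1, h.2⟩)]
        by_cases h2 : t = s ∧ u = x
        · rw [if_pos (by simp [h2.1, h2.2]), if_neg h1, if_pos h2]
        · rw [if_neg (by simp only [Prod.mk.injEq]; exact fun h => h2 ⟨h.1, h.2⟩),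
              if_neg h1, if_neg h2]
    rw [hgd]
    have h5 : u ≠ t := fun h => htu h.symm
    split_ifs <;> simp_all [List.mem_cons]

-- the scan's net component: the pair-sign of the final seen list
lemma pvNet_fold_fst (order : List String) (t u : String) (htu : t ≠ u) :
    ∀ (S : List String) (n : PySem.Dict (String × String) Int), S.Nodup →
    ((order.foldl (fun acc x => if acc.2.contains x then acc
        else (pvAddPairs acc.1 acc.2 x, acc.2 ++ [x])) (n, S)).1).getD (t, u) 0
      = n.getD (t, u) 0 + pvSign (pvSeen S order) t u - pvSign S t u := by
  induction order with
  | nil => intro S n _; rw [pvSeen_nil]; simp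
  | cons x rest ih =>
    intro S n hnd
    rw [List.foldl_cons, pvSeen_cons]
    by_cases hx : S.contains x = true
    · rw [if_pos hx, if_pos hx]
      exact ih S n hnd
    · have hxS : x ∉ S := by simpa using hx
      have hnd' : (S ++ [x]).Nodup := by
        refine List.Nodup.append hnd (List.nodup_singleton x) ?_
        simpa [List.disjoint_singleton] using hxS
      rw [if_neg hx, if_neg hx]
      show ((List.foldl (fun acc x => if acc.2.contains x = true then acc
          else (pvAddPairs acc.1 acc.2 x, acc.2 ++ [x])) (pvAddPairs n S x, S ++ [x]) rest).1).getD (t, u) 0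
        = n.getD (t, u) 0 + pvSign (pvSeen (S ++ [x]) rest) t u - pvSign S t u
      rw [ih (S ++ [x]) (pvAddPairs n S x) hnd', pvAddPairs_getD S n x t u hxS hnd htu,
          pvSign_snoc S x t u hxS htu]
      ring


lemma pvNetStep_getD (n : PySem.Dict (String × String) Int) (order : List String)
    (t u : String) (htu : t ≠ u) :
    (pvNetStep n order).getD (t, u) 0 = n.getD (t, u) 0 + pvSign (pvSeen [] order) t u := by
  rw [pvNetStep, pvNet_fold_fst order t u htu [] n List.nodup_nil]
  simp [pvSign]

lemma pvNet_items_getD (items : List (String × List String)) (t u : String) (htu : t ≠ u) :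
    ∀ n0 : PySem.Dict (String × String) Int,
    ((items.foldl (fun n p => pvNetStep n p.2) n0)).getD (t, u) 0
      = n0.getD (t, u) 0 + (items.map (fun p => pvSign (pvSeen [] p.2) t u)).sum := by
  induction items with
  | nil => intro n0; simp
  | cons p rest ih =>
    intro n0
    rw [List.foldl_cons, ih (pvNetStep n0 p.2), pvNetStep_getD n0 p.2 t u htu]
    simp only [List.map_cons, List.sum_cons]
    ring

lemma pv_notMem_append_singleton {a x : String} {S : List String}
    (h1 : a ∉ S) (h2 : a ≠ x) : a ∉ S ++ [x] := by
  simp [List.mem_append, h1, h2]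

-- keep-first dedup preserves the relative order of first occurrences
lemma pvSeen_idxOf_cmp (order : List String) (t u : String) (htu : t ≠ u) :
    ∀ S : List String, t ∉ S → u ∉ S → t ∈ order → u ∈ order →
    ((pvSeen S order).idxOf t < (pvSeen S order).idxOf u ↔ order.idxOf t < order.idxOf u) := by
  induction order with
  | nil => intro S _ _ ht _; cases ht
  | cons x rest ih =>
    intro S htS huS htm hum
    rw [pvSeen_cons]
    by_cases hxt : x = t
    · subst hxt
      rw [if_neg (by simpa using htS)]
      have hur : u ∈ rest := (List.mem_cons.mp hum).resolve_left (fun h => htu h.symm)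
      have h1 : (pvSeen (S ++ [x]) rest).idxOf x = S.length := by
        rw [pvSeen_idxOf_mem rest (S ++ [x]) x (by simp), List.idxOf_append_of_notMem htS]
        simp
      have h2 : S.length + 1 ≤ (pvSeen (S ++ [x]) rest).idxOf u := by
        have := pvSeen_idxOf_notMem rest (S ++ [x]) u
          (pv_notMem_append_singleton huS (fun h => htu h.symm))
        simpa using this
      have h3 : (x :: rest).idxOf x = 0 := List.idxOf_cons_eq rest rfl
      have h4 : (x :: rest).idxOf u = (rest.idxOf u) + 1 := List.idxOf_cons_ne rest htu
      rw [h1, h3, h4]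
      exact iff_of_true (by omega) (by omega)
    · by_cases hxu : x = u
      · subst hxu
        rw [if_neg (by simpa using huS)]
        have htr : t ∈ rest := (List.mem_cons.mp htm).resolve_left (fun h => htu h)
        have h1 : (pvSeen (S ++ [x]) rest).idxOf x = S.length := by
          rw [pvSeen_idxOf_mem rest (S ++ [x]) x (by simp), List.idxOf_append_of_notMem huS]
          simp
        have h2 : S.length + 1 ≤ (pvSeen (S ++ [x]) rest).idxOf t := by
          have := pvSeen_idxOf_notMem rest (S ++ [x]) t
            (pv_notMem_append_singleton htS htu)
          simpa using this
        have h3 : (x :: rest).idxOf x = 0 := List.idxOf_cons_eq rest rfl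
        have h4 : (x :: rest).idxOf t = (rest.idxOf t) + 1 :=
          List.idxOf_cons_ne rest (fun h => htu h.symm)
        rw [h1, h3, h4]
        exact iff_of_false (by omega) (by omega)
      · have htr : t ∈ rest := (List.mem_cons.mp htm).resolve_left (fun h => hxt h.symm)
        have hur : u ∈ rest := (List.mem_cons.mp hum).resolve_left (fun h => hxu h.symm)
        have h3 : (x :: rest).idxOf t = (rest.idxOf t) + 1 := List.idxOf_cons_ne rest hxt
        have h4 : (x :: rest).idxOf u = (rest.idxOf u) + 1 := List.idxOf_cons_ne rest hxu
        by_cases hx : S.contains x = true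
        · rw [if_pos hx, ih S htS huS htr hur, h3, h4]
          omega
        · rw [if_neg hx,
              ih (S ++ [x]) (pv_notMem_append_singleton htS (fun h => hxt h.symm))
                (pv_notMem_append_singleton huS (fun h => hxu h.symm)) htr hur, h3, h4]
          omega

lemma pvSign_order (order : List String) (t u : String) (htu : t ≠ u)
    (ht : t ∈ order) (hu : u ∈ order) :
    pvSign (pvSeen [] order) t u = if order.idxOf t < order.idxOf u then 1 else -1 := by
  rw [pvSign, if_pos ⟨(pvSeen_mem order [] t).mpr (Or.inr ht),
      (pvSeen_mem order [] u).mpr (Or.inr hu)⟩,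
      if_congr (pvSeen_idxOf_cmp order t u htu [] (by simp) (by simp) ht hu) rfl rfl]

-- distinct members have distinct first-occurrence indices
lemma pv_idxOf_ne (l : List String) (t u : String) (htu : t ≠ u) (ht : t ∈ l) (_hu : u ∈ l) :
    l.idxOf t ≠ l.idxOf u := fun h => htu ((List.idxOf_inj ht).mp h)

-- list.index agrees with idxOf on members (A-side primitive)
lemma pv_pvIdx_eq_idxOf (l : List String) (s : String) (h : s ∈ l) :
    pvIdx l s = l.idxOf s := by
  induction l with
  | nil => cases h
  | cons x xs ih =>
    by_cases hxs : x = s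
    · subst hxs
      rw [pvIdx, PySem.List.index?_cons_self, Option.getD_some, List.idxOf_cons_eq _ rfl]
    · have hm : s ∈ xs := by
        rcases List.mem_cons.mp h with h1 | h1
        · exact absurd h1.symm hxs
        · exact h1
      obtain ⟨i, hi⟩ := Option.isSome_iff_exists.mp ((PySem.List.index?_isSome_iff xs s).mpr hm)
      have hih := ih hm
      rw [pvIdx, hi, Option.getD_some] at hih
      rw [pvIdx, PySem.List.index?_cons_of_ne _ hxs, hi, Option.map_some, Option.getD_some,
          List.idxOf_cons_ne _ hxs, ← hih]

lemma pv_sum_ite (l : List (String × List String)) (p : (String × List String) → Prop)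
    [DecidablePred p] :
    (l.map fun x => if p x then (1 : Int) else 0).sum
      = (l.countP (fun x => decide (p x)) : Int) := by
  induction l with
  | nil => simp
  | cons x t ih =>
    by_cases h : p x
    · simp [h, ih]; omega
    · simp [h, ih]

lemma pv_count_idx (items : List (String × List String)) (t u : String)
    (hm : ∀ p ∈ items, t ∈ p.2 ∧ u ∈ p.2) :
    items.countP (fun p => decide (pvIdx p.2 t < pvIdx p.2 u))
      = items.countP (fun p => p.2.idxOf t < p.2.idxOf u) := by
  apply List.countP_congr
  intro p hp
  simp [pv_pvIdx_eq_idxOf _ _ (hm p hp).1, pv_pvIdx_eq_idxOf _ _ (hm p hp).2]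

-- B's net value is A's pairwise count difference
lemma pv_net_eq (items : List (String × List String)) (t u : String) (htu : t ≠ u)
    (hm : ∀ p ∈ items, t ∈ p.2 ∧ u ∈ p.2) :
    ((items.foldl (fun n p => pvNetStep n p.2) PySem.Dict.empty)).getD (t, u) 0
      = (items.map (fun p => if pvIdx p.2 t < pvIdx p.2 u then (1 : Int) else 0)).sum
        - (items.map (fun p => if pvIdx p.2 u < pvIdx p.2 t then (1 : Int) else 0)).sum := by
  rw [pvNet_items_getD items t u htu PySem.Dict.empty, PySem.Dict.getD_empty]
  have hsum : ∀ its : List (String × List String), (∀ p ∈ its, t ∈ p.2 ∧ u ∈ p.2) →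
      (its.map (fun p => pvSign (pvSeen [] p.2) t u)).sum
        = (its.map (fun p => if pvIdx p.2 t < pvIdx p.2 u then (1 : Int) else 0)).sum
          - (its.map (fun p => if pvIdx p.2 u < pvIdx p.2 t then (1 : Int) else 0)).sum := by
    intro its hmem
    induction its with
    | nil => simp
    | cons p rest ih =>
      have hp := hmem p (by simp)
      simp only [List.map_cons, List.sum_cons]
      rw [ih (fun q hq => hmem q (by simp [hq])), pvSign_order p.2 t u htu hp.1 hp.2,
          pv_pvIdx_eq_idxOf p.2 t hp.1, pv_pvIdx_eq_idxOf p.2 u hp.2]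
      have hne := pv_idxOf_ne p.2 t u htu hp.1 hp.2
      by_cases hlt : p.2.idxOf t < p.2.idxOf u
      · rw [if_pos hlt, if_pos hlt, if_neg (by omega)]; ring
      · rw [if_neg hlt, if_neg hlt, if_pos (by omega)]; ring
  rw [hsum items hm]
  ring


-- the crux: A's compare-token test agrees with B's net test (outside the "Tie"-collision region)
lemma pv_cmp (items : List (String × List String)) (t u : String) (htu : t ≠ u)
    (hm : ∀ p ∈ items, t ∈ p.2 ∧ u ∈ p.2)
    (htie : t = "Tie" →
      items.countP (fun p => p.2.idxOf "Tie" < p.2.idxOf u)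
        ≠ items.countP (fun p => p.2.idxOf u < p.2.idxOf "Tie")) :
    (pvCompare items t u == t)
      = decide (0 < ((items.foldl (fun n p => pvNetStep n p.2) PySem.Dict.empty)).getD (t, u) 0) := by
  have hcountA := pv_count_idx items t u hm
  have hcountB := pv_count_idx items u t (fun p hp => ⟨(hm p hp).2, (hm p hp).1⟩)
  have hnet := pv_net_eq items t u htu hm
  have ha := pv_sum_ite items (fun p => pvIdx p.2 t < pvIdx p.2 u)
  have hb := pv_sum_ite items (fun p => pvIdx p.2 u < pvIdx p.2 t)
  rw [hnet]
  simp only [pvCompare]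
  rcases lt_trichotomy ((items.map fun p => if pvIdx p.2 u < pvIdx p.2 t then (1 : Int) else 0).sum)
      ((items.map fun p => if pvIdx p.2 t < pvIdx p.2 u then (1 : Int) else 0).sum) with h1 | h1 | h1
  · rw [if_pos h1]
    simp only [beq_self_eq_true]
    symm
    simp only [decide_eq_true_eq]
    omega
  · rw [if_neg (by omega), if_neg (by omega)]
    have hne : t ≠ "Tie" := by
      intro ht
      apply htie ht
      rw [← ht, ← hcountA, ← hcountB]
      rw [ha, hb] at h1
      omega
    rw [show (("Tie" : String) == t) = false by
      simp only [beq_eq_false_iff_ne]; exact fun h => hne h.symm]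
    symm
    simp only [decide_eq_false_iff_not]
    omega
  · rw [if_neg (by omega), if_pos h1]
    rw [show ((u : String) == t) = false by
      simp only [beq_eq_false_iff_ne]; exact fun h => htu h.symm]
    symm
    simp only [decide_eq_false_iff_not]
    omega

-- B's net test implies A's compare token (needed for the tightness direction)
lemma pv_cmp_mp (items : List (String × List String)) (t u : String) (htu : t ≠ u)
    (hm : ∀ p ∈ items, t ∈ p.2 ∧ u ∈ p.2)
    (hb : decide (0 < ((items.foldl (fun n p => pvNetStep n p.2) PySem.Dict.empty)).getD (t, u) 0) = true) :
    (pvCompare items t u == t) = true := by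
  rw [pv_net_eq items t u htu hm] at hb
  simp only [decide_eq_true_eq] at hb
  simp only [pvCompare]
  rw [if_pos (by omega)]
  simp

-- an exact tie: A's compare returns the sentinel, B's net test is false
lemma pv_cmp_tie (items : List (String × List String)) (t u : String) (htu : t ≠ u)
    (hm : ∀ p ∈ items, t ∈ p.2 ∧ u ∈ p.2)
    (hcnt : items.countP (fun p => p.2.idxOf t < p.2.idxOf u)
          = items.countP (fun p => p.2.idxOf u < p.2.idxOf t)) :
    pvCompare items t u = "Tie"
      ∧ decide (0 < ((items.foldl (fun n p => pvNetStep n p.2) PySem.Dict.empty)).getD (t, u) 0) = false := by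
  have ha := pv_sum_ite items (fun p => pvIdx p.2 t < pvIdx p.2 u)
  have hb := pv_sum_ite items (fun p => pvIdx p.2 u < pvIdx p.2 t)
  have hsums : (items.map fun p => if pvIdx p.2 t < pvIdx p.2 u then (1 : Int) else 0).sum
      = (items.map fun p => if pvIdx p.2 u < pvIdx p.2 t then (1 : Int) else 0).sum := by
    rw [ha, hb, pv_count_idx items t u hm,
        pv_count_idx items u t (fun p hp => ⟨(hm p hp).2, (hm p hp).1⟩), hcnt]
  constructor
  · simp only [pvCompare]
    rw [if_neg (by omega), if_neg (by omega)]
  · rw [pv_net_eq items t u htu hm]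
    simp only [decide_eq_false_iff_not]
    omega

-- ---- A-side: the nested dict-of-sets loops ----

-- A's inner loop threads only the set at key t
lemma pv_inner_getD (items : List (String × List String)) (t : String) (l : List String)
    (d : PySem.Dict String (PySem.Set String)) :
    ((l.foldl (fun d' u => if t == u then d'
        else if pvCompare items t u == t then d'.modify t PySem.Set.empty (fun s => PySem.Set.add s u)
        else d') d)).getD t PySem.Set.empty
      = l.foldl (fun s u => if pvCondA items t u then PySem.Set.add s u else s)
          (d.getD t PySem.Set.empty) := by
  induction l generalizing d with
  | nil => rfl
  | cons u rest ih =>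
    simp only [List.foldl_cons]
    by_cases h1 : t = u
    · rw [if_pos (by simp [h1]), if_neg (by simp [pvCondA, h1]), ih]
    · by_cases h2 : pvCompare items t u = t
      · rw [if_neg (by simp [h1]), if_pos (by simp [h2]),
            if_pos (by simp [pvCondA, h1, h2]), ih, PySem.Dict.getD_modify_self]
      · rw [if_neg (by simp [h1]), if_neg (by simp [h2]),
            if_neg (by simp [pvCondA, h1, h2]), ih]

lemma pv_inner_getD_ne (items : List (String × List String)) (t : String) (l : List String)
    (d : PySem.Dict String (PySem.Set String)) (k : String) (hk : k ≠ t) :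
    ((l.foldl (fun d' u => if t == u then d'
        else if pvCompare items t u == t then d'.modify t PySem.Set.empty (fun s => PySem.Set.add s u)
        else d') d)).getD k PySem.Set.empty
      = d.getD k PySem.Set.empty := by
  induction l generalizing d with
  | nil => rfl
  | cons u rest ih =>
    simp only [List.foldl_cons]
    by_cases h1 : t = u
    · rw [if_pos (by simp [h1]), ih]
    · by_cases h2 : pvCompare items t u = t
      · rw [if_neg (by simp [h1]), if_pos (by simp [h2]), ih,
            PySem.Dict.getD_modify_of_ne _ _ _ hk]
      · rw [if_neg (by simp [h1]), if_neg (by simp [h2]), ih]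

lemma pv_inner_keys (items : List (String × List String)) (t : String) (l : List String)
    (d : PySem.Dict String (PySem.Set String)) (hc : d.contains t = true) :
    ((l.foldl (fun d' u => if t == u then d'
        else if pvCompare items t u == t then d'.modify t PySem.Set.empty (fun s => PySem.Set.add s u)
        else d') d)).keys = d.keys := by
  induction l generalizing d with
  | nil => rfl
  | cons u rest ih =>
    simp only [List.foldl_cons]
    by_cases h1 : t = u
    · rw [if_pos (by simp [h1]), ih _ hc]
    · by_cases h2 : pvCompare items t u = t
      · rw [if_neg (by simp [h1]), if_pos (by simp [h2]),
            ih _ (by rw [PySem.Dict.contains_modify]; simp),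
            PySem.Dict.keys_modify, PySem.Dict.keys_insert_of_contains]
        exact hc
      · rw [if_neg (by simp [h1]), if_neg (by simp [h2]), ih _ hc]

lemma pv_outer_keys (items : List (String × List String)) (tn : List String) (l : List String)
    (d : PySem.Dict String (PySem.Set String)) (hl : ∀ x ∈ l, d.contains x = true) :
    (l.foldl (fun d t =>
      tn.foldl (fun d' u => if t == u then d'
        else if pvCompare items t u == t then d'.modify t PySem.Set.empty (fun s => PySem.Set.add s u)
        else d') d) d).keys = d.keys := by
  induction l generalizing d with
  | nil => rfl
  | cons t rest ih =>
    simp only [List.foldl_cons]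
    have hk := pv_inner_keys items t tn d (hl t (by simp))
    rw [ih _ (fun x hx => by
      rw [PySem.Dict.contains_iff_mem_keys, hk, ← PySem.Dict.contains_iff_mem_keys]
      exact hl x (by simp [hx]))]
    exact hk

lemma pv_outer_getD_ne (items : List (String × List String)) (tn : List String) (l : List String)
    (d : PySem.Dict String (PySem.Set String)) (t : String) (ht : t ∉ l) :
    (l.foldl (fun d t' =>
      tn.foldl (fun d' u => if t' == u then d'
        else if pvCompare items t' u == t' then d'.modify t' PySem.Set.empty (fun s => PySem.Set.add s u)
        else d') d) d).getD t PySem.Set.empty = d.getD t PySem.Set.empty := by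
  induction l generalizing d with
  | nil => rfl
  | cons t' rest ih =>
    simp only [List.foldl_cons]
    rw [ih _ (fun h => ht (by simp [h])),
        pv_inner_getD_ne items t' tn d t (fun h => ht (by simp [h]))]

lemma pv_addif_eq_update (items : List (String × List String)) (t : String)
    (tn : List String) (s : PySem.Set String) :
    tn.foldl (fun s u => if pvCondA items t u then PySem.Set.add s u else s) s
      = PySem.Set.update s (tn.filter (pvCondA items t)) := by
  rw [← List.foldl_filter]
  rfl

lemma pv_update_idem (s : PySem.Set String) (xs : List String) :
    PySem.Set.update (PySem.Set.update s xs) xs = PySem.Set.update s xs := by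
  rw [PySem.Set.update_eq_append_filter (PySem.Set.update s xs) xs,
      List.filter_eq_nil_iff.mpr ?h, List.append_nil]
  case h =>
    intro y hy
    have hmem : y ∈ PySem.Set.update s xs := by
      rw [PySem.Set.mem_update]
      right
      simpa [PySem.Set.mem_ofList] using hy
    simp [hmem]

lemma pv_outer_getD (items : List (String × List String)) (tn : List String) (l : List String)
    (d : PySem.Dict String (PySem.Set String)) (t : String) (ht : t ∈ l) :
    (l.foldl (fun d t' =>
      tn.foldl (fun d' u => if t' == u then d'
        else if pvCompare items t' u == t' then d'.modify t' PySem.Set.empty (fun s => PySem.Set.add s u)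
        else d') d) d).getD t PySem.Set.empty
      = PySem.Set.update (d.getD t PySem.Set.empty) (tn.filter (pvCondA items t)) := by
  induction l generalizing d with
  | nil => cases ht
  | cons t' rest ih =>
    simp only [List.foldl_cons]
    by_cases h : t' = t
    · subst h
      have hd' := (pv_inner_getD items t' tn d).trans (pv_addif_eq_update items t' tn _)
      by_cases hr : t' ∈ rest
      · rw [ih _ hr, hd', pv_update_idem]
      · rw [pv_outer_getD_ne items tn rest _ t' hr, hd']
    · have hr : t ∈ rest := by
        rcases List.mem_cons.mp ht with h1 | h1
        · exact absurd h1.symm h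
        · exact h1
      rw [ih _ hr, pv_inner_getD_ne items t' tn d t (fun hh => h hh.symm)]

-- initial dict of empty sets: every stored/default value is the empty set
lemma pv_ws0_getD (l : List String) (d : PySem.Dict String (PySem.Set String)) (t : String)
    (h : t ∈ l ∨ d.getD t PySem.Set.empty = PySem.Set.empty) :
    ((l.foldl (fun d x => d.insert x PySem.Set.empty) d)).getD t PySem.Set.empty
      = PySem.Set.empty := by
  induction l generalizing d with
  | nil =>
    rcases h with h | h
    · cases h
    · exact h
  | cons x rest ih =>
    simp only [List.foldl_cons]
    apply ih
    by_cases hx : t = x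
    · right; subst hx; rw [PySem.Dict.getD_insert_self]
    · rcases h with h | h
      · rcases List.mem_cons.mp h with h1 | h1
        · exact absurd h1 hx
        · left; exact h1
      · right; rw [PySem.Dict.getD_insert_of_ne _ _ _ hx]; exact h

lemma pv_ws0_keys (l : List String) :
    ((l.foldl (fun d x => d.insert x PySem.Set.empty) PySem.Dict.empty) :
      PySem.Dict String (PySem.Set String)).keys = PySem.Set.ofList l := by
  rw [PySem.Dict.keys_foldl_insert, PySem.Dict.keys_empty]
  rfl

-- final folding of (key, set) pairs into total_wins
lemma pv_total_getD_ne (l : List (String × PySem.Set String)) (d : PySem.Dict String Int)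
    (k : String) (hk : k ∉ l.map Prod.fst) :
    (l.foldl (fun d p => d.insert p.1 (PySem.Set.len p.2)) d).getD k 0 = d.getD k 0 := by
  induction l generalizing d with
  | nil => rfl
  | cons p rest ih =>
    simp only [List.foldl_cons]
    rw [ih _ (fun h => hk (by simp [h])),
        PySem.Dict.getD_insert_of_ne _ _ _ (fun h => hk (by simp [h]))]

lemma pv_total_getD (l : List (String × PySem.Set String)) (d : PySem.Dict String Int)
    (k : String) (v : PySem.Set String) (hnd : (l.map Prod.fst).Nodup) (hmem : (k, v) ∈ l) :
    (l.foldl (fun d p => d.insert p.1 (PySem.Set.len p.2)) d).getD k 0 = PySem.Set.len v := by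
  induction l generalizing d with
  | nil => cases hmem
  | cons p rest ih =>
    simp only [List.foldl_cons]
    by_cases h : p.1 = k
    · have hp : p = (k, v) := by
        rcases List.mem_cons.mp hmem with h1 | h1
        · exact h1.symm
        · exfalso
          have hin : k ∈ rest.map Prod.fst := List.mem_map.mpr ⟨(k, v), h1, rfl⟩
          rw [← h] at hin
          exact (List.nodup_cons.mp (by simpa using hnd)).1 hin
      rw [pv_total_getD_ne rest _ k (by rw [← h]; exact (List.nodup_cons.mp (by simpa using hnd)).1)]
      rw [hp, PySem.Dict.getD_insert_self]
    · apply ih _ (by simpa using (List.nodup_cons.mp (by simpa using hnd)).2)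
      rcases List.mem_cons.mp hmem with h1 | h1
      · exact absurd (congrArg Prod.fst h1.symm) h
      · exact h1

-- A's per-team total: the distinct opponents u with compare-token t
lemma pv_Aterm (items : List (String × List String)) (tn : List String) (t : String)
    (ht : t ∈ tn) :
    ((pvGetAllWins items tn).items.foldl (fun d p => d.insert p.1 (PySem.Set.len p.2))
        (tn.foldl (fun d t => d.insert t (0 : Int)) PySem.Dict.empty)).getD t 0
      = PySem.Set.len (PySem.Set.ofList (tn.filter (pvCondA items t))) := by
  have hkeys0 : ((tn.foldl (fun d t => d.insert t PySem.Set.empty) PySem.Dict.empty) :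
      PySem.Dict String (PySem.Set String)).keys = PySem.Set.ofList tn := pv_ws0_keys tn
  have hkeys : (pvGetAllWins items tn).keys = PySem.Set.ofList tn := by
    simp only [pvGetAllWins]
    exact (pv_outer_keys items tn tn _ (fun x hx => by
      rw [PySem.Dict.contains_iff_mem_keys, hkeys0]
      simpa [PySem.Set.mem_ofList] using hx)).trans hkeys0
  have hSt : (pvGetAllWins items tn).getD t PySem.Set.empty
      = PySem.Set.ofList (tn.filter (pvCondA items t)) := by
    simp only [pvGetAllWins]
    rw [pv_outer_getD items tn tn _ t ht, pv_ws0_getD tn _ t (Or.inl ht)]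
    rfl
  have hcont : (pvGetAllWins items tn).contains t = true := by
    rw [PySem.Dict.contains_iff_mem_keys, hkeys]
    simpa [PySem.Set.mem_ofList] using ht
  have hget : (pvGetAllWins items tn).get? t
      = some (PySem.Set.ofList (tn.filter (pvCondA items t))) := by
    cases hg : (pvGetAllWins items tn).get? t with
    | none =>
      exfalso
      rw [PySem.Dict.contains_eq_isSome_get?, hg] at hcont
      simp at hcont
    | some v =>
      have h1 := PySem.Dict.getD_eq_get?_getD (pvGetAllWins items tn) t PySem.Set.empty
      rw [hg, Option.getD_some, hSt] at h1
      rw [← h1]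
  have hmemitems : (t, PySem.Set.ofList (tn.filter (pvCondA items t)))
      ∈ (pvGetAllWins items tn).items :=
    PySem.Dict.mem_items_of_get?_eq_some _ hget
  have hnodupf : ((pvGetAllWins items tn).items.map Prod.fst).Nodup := by
    have he : (pvGetAllWins items tn).items.map Prod.fst = (pvGetAllWins items tn).keys := rfl
    rw [he, hkeys]
    exact PySem.Set.nodup_ofList tn
  exact pv_total_getD _ _ t _ hnodupf hmemitems

-- ===== VERDICT (by name: the statement is the Claim_ definition above) =====
theorem get_team_wins_summary_spec : Claim_unchanged_get_team_wins_summary := by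
  intro rankings team_names hdom hpre hD
  simp only [get_team_wins_summary, get_team_wins_summary_alt]
  refine congrArg (fun l => PySem.List.sorted l (fun x : String × Int => x.2) true) ?_
  apply List.map_congr_left
  intro t ht
  simp only [Prod.mk.injEq, true_and]
  set items := (PySem.Dict.ofList rankings).items with hitems
  rw [pv_Aterm items team_names t ht]
  have hfeq : team_names.filter (pvCondA items t)
      = team_names.filter (fun u => u != t &&
          decide (((items.foldl (fun n p => pvNetStep n p.2) PySem.Dict.empty)).getD (t, u) 0 > 0)) := by
    apply List.filter_congr
    intro u hu
    by_cases hut : u = t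
    · subst hut; simp [pvCondA]
    · have htu : t ≠ u := fun h => hut h.symm
      have hm : ∀ p ∈ items, t ∈ p.2 ∧ u ∈ p.2 := fun p hp =>
        ⟨hpre ⟨t, ht, u, hu, htu⟩ t ht p hp, hpre ⟨t, ht, u, hu, htu⟩ u hu p hp⟩
      have hcmp := pv_cmp items t u htu hm (fun hT hcnt =>
        hD ⟨hT ▸ ht, u, hu, fun h => hut (h.trans hT.symm), hcnt⟩)
      have e1 : (t == u) = false := by simp only [beq_eq_false_iff_ne]; exact htu
      have e2 : (u != t) = true := by simp only [bne_iff_ne]; exact hut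
      rw [pvCondA, e1, e2]
      simp only [Bool.not_false, Bool.true_and]
      exact hcmp
  rw [hfeq]

theorem get_team_wins_summary_changed : Claim_changed_get_team_wins_summary := by
  unfold Claim_changed_get_team_wins_summary; decide

theorem get_team_wins_summary_tight : Claim_exact_get_team_wins_summary := by
  intro rankings team_names hdom hpre hD heq
  obtain ⟨hTie, u, hu, huT, hcnt⟩ := hD
  set items := (PySem.Dict.ofList rankings).items with hitems
  have hTu : ("Tie" : String) ≠ u := fun h => huT h.symm
  have hm : ∀ p ∈ items, ("Tie" : String) ∈ p.2 ∧ u ∈ p.2 := fun p hp =>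
    ⟨hpre ⟨"Tie", hTie, u, hu, hTu⟩ "Tie" hTie p hp,
     hpre ⟨"Tie", hTie, u, hu, hTu⟩ u hu p hp⟩
  obtain ⟨hcmpT, hbF⟩ := pv_cmp_tie items "Tie" u hTu hm hcnt
  set SA := PySem.Set.ofList (team_names.filter (pvCondA items "Tie")) with hSA
  set SB := PySem.Set.ofList (team_names.filter
      (fun y => y != "Tie" &&
        decide (((items.foldl (fun n p => pvNetStep n p.2) PySem.Dict.empty)).getD ("Tie", y) 0 > 0))) with hSB
  -- the witness u is counted by A but not by B
  have hcA : pvCondA items "Tie" u = true := by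
    rw [pvCondA]
    simp only [Bool.and_eq_true, Bool.not_eq_true', beq_eq_false_iff_ne]
    exact ⟨hTu, by rw [hcmpT]; simp⟩
  have hcB : (u != "Tie" &&
      decide (((items.foldl (fun n p => pvNetStep n p.2) PySem.Dict.empty)).getD ("Tie", u) 0 > 0)) = false := by
    rw [hbF]
    simp
  -- every opponent B counts, A counts too
  have hsub : (u :: SB) ⊆ SA := by
    intro y hy
    rcases List.mem_cons.mp hy with rfl | hy
    · rw [hSA, PySem.Set.mem_ofList, List.mem_filter]
      exact ⟨hu, hcA⟩
    · rw [hSB, PySem.Set.mem_ofList, List.mem_filter] at hy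
      obtain ⟨hyn, hyc⟩ := hy
      simp only [Bool.and_eq_true, bne_iff_ne] at hyc
      obtain ⟨hyT, hb⟩ := hyc
      have hTy : ("Tie" : String) ≠ y := fun h => hyT h.symm
      have hmy : ∀ p ∈ items, ("Tie" : String) ∈ p.2 ∧ y ∈ p.2 := fun p hp =>
        ⟨hpre ⟨"Tie", hTie, y, hyn, hTy⟩ "Tie" hTie p hp,
         hpre ⟨"Tie", hTie, y, hyn, hTy⟩ y hyn p hp⟩
      rw [hSA, PySem.Set.mem_ofList, List.mem_filter]
      refine ⟨hyn, ?_⟩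
      rw [pvCondA]
      simp only [Bool.and_eq_true, Bool.not_eq_true', beq_eq_false_iff_ne]
      exact ⟨hTy, pv_cmp_mp items "Tie" y hTy hmy (by exact_mod_cast hb)⟩
  have hnodup : (u :: SB).Nodup := by
    rw [List.nodup_cons]
    refine ⟨fun hmem => ?_, PySem.Set.nodup_ofList _⟩
    rw [hSB, PySem.Set.mem_ofList, List.mem_filter] at hmem
    rw [hcB] at hmem
    exact absurd hmem.2 (by simp)
  have hlt : SB.length < SA.length := by
    have hle := (List.subperm_of_subset hnodup hsub).length_le
    simpa using hle
  -- "Tie"'s entry in A's output cannot appear in B's output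
  have hA : ("Tie", PySem.Set.len SA) ∈ get_team_wins_summary rankings team_names := by
    simp only [get_team_wins_summary]
    rw [← hitems, PySem.List.mem_sorted]
    refine List.mem_map.mpr ⟨"Tie", hTie, ?_⟩
    rw [pv_Aterm items team_names "Tie" hTie]
  have hB : ("Tie", PySem.Set.len SA) ∈ get_team_wins_summary_alt rankings team_names :=
    heq ▸ hA
  simp only [get_team_wins_summary_alt] at hB
  rw [← hitems, PySem.List.mem_sorted] at hB
  obtain ⟨y, hy, hpair⟩ := List.mem_map.mp hB
  rw [Prod.mk.injEq] at hpair
  obtain ⟨hy1, hy2⟩ := hpair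
  subst hy1
  rw [← hSB] at hy2
  rw [PySem.Set.len, PySem.Set.len] at hy2
  omega
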